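-- pv_equiv track=rewrite | github.com/zhenzhiwin/pccsite | chargingcheck.py | get_tup
-- ===== SOURCE A (Python) =====
-- def get_tup(loglist):
--     front = -1
--     end = -1
--     lst = []
--     for a in range(0, len(loglist)):
--         if ">pGWRecord(79)" in loglist[a]:
--             front = a
--             for j in range(front, len(loglist)):
--                 if "consolidationResult" in loglist[j]:
--                     end = j
--                     lst.append((front, end))
--                     break
--     return lst
-- ===== SOURCE B (Python) =====
-- def get_tup(loglist):
--     # Alternative: one backward pass records, for every position, the index of the next
--     # line containing "consolidationResult"; one forward pass emits pairs.
--     n = len(loglist)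
--     nxt = [-1] * n
--     last = -1
--     for i in range(n - 1, -1, -1):
--         if "consolidationResult" in loglist[i]:
--             last = i
--         nxt[i] = last
--     return [(i, nxt[i]) for i, line in enumerate(loglist)
--             if ">pGWRecord(79)" in line and nxt[i] != -1]
-- ===== Notes on version B (the rewrite author's own statement) =====
-- stated objective: alternative
-- what changed: Replaces the inner forward rescan for the next 'consolidationResult' line per match with a single backward suffix pass precomputing that index, then one forward pass emits the pairs.
import Mathlib
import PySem

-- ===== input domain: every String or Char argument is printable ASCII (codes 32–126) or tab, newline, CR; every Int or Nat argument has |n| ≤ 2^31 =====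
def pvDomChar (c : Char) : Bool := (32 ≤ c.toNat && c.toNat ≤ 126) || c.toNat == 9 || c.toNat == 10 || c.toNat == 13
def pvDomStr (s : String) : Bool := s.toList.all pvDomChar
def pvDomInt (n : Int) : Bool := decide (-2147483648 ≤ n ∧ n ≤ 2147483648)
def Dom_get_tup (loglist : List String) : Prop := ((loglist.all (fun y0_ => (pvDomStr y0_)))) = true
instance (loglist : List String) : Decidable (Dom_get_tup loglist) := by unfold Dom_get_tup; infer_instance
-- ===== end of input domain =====

-- B replaces A's per-match inner rescan by one backward pass precomputing the
-- next "consolidationResult" index per position (alternative single-pass algorithm).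

-- ===== PORT A =====
-- inner 'for j in range(front, len(loglist)): … break' loop, carrying (end, lst)
def aInner (loglist : List String) (front : Int) (js : List Int)
    (endv : Int) (lst : List (Int × Int)) : Int × List (Int × Int) :=
  match js with
  | [] => (endv, lst)
  | j :: rest =>
      if PySem.Str.isIn "consolidationResult" (PySem.List.pyGetD loglist j "") then
        (j, lst ++ [(front, j)])
      else aInner loglist front rest endv lst

def get_tup (loglist : List String) : List (Int × Int) :=
  let st := (PySem.List.pyRange 0 (loglist.length : Int) 1).foldl
    (fun (st : Int × Int × List (Int × Int)) a =>
      if PySem.Str.isIn ">pGWRecord(79)" (PySem.List.pyGetD loglist a "") then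
        let front := a
        let (endv, lst) := aInner loglist front
          (PySem.List.pyRange front (loglist.length : Int) 1) st.2.1 st.2.2
        (front, endv, lst)
      else st)
    (-1, -1, [])
  st.2.2

-- ===== PORT B =====
-- single backward pass: returns (pairs for this suffix, index of the next
-- "consolidationResult" line in this suffix), suffix starting at index i
def bGo (xs : List String) (i : Int) : List (Int × Int) × Option Int :=
  match xs with
  | [] => ([], none)
  | s :: rest =>
      let (tl, nx) := bGo rest (i + 1)
      let nx' := if PySem.Str.isIn "consolidationResult" s then some i else nx
      ((if PySem.Str.isIn ">pGWRecord(79)" s then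
          match nx' with
          | some j => (i, j) :: tl
          | none => tl
        else tl), nx')

def get_tup_alt (loglist : List String) : List (Int × Int) :=
  (bGo loglist 0).1

-- ===== PRECONDITION & SPEC =====
def Spec_get_tup (loglist : List String) (out : List (Int × Int)) : Prop := out = get_tup_alt loglist
instance (loglist : List String) (out : List (Int × Int)) : Decidable (Spec_get_tup loglist out) := by unfold Spec_get_tup; infer_instance

-- ===== CLAIM (what is proved, stated in full; the proofs are below) =====
def Claim_equal_get_tup : Prop := ∀ (loglist : List String), Dom_get_tup loglist → Spec_get_tup loglist (get_tup loglist)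

-- ===== LEMMAS AND PROOFS =====

-- A's inner scan over pyRange i n computes exactly bGo's "next" index
theorem aInner_eq (loglist : List String) (suffix : List String) :
    ∀ (i : Int) (f e : Int) (lst : List (Int × Int)), 0 ≤ i →
      loglist.drop i.toNat = suffix →
      aInner loglist f (PySem.List.pyRange i (loglist.length : Int) 1) e lst =
        (match (bGo suffix i).2 with
         | some j => (j, lst ++ [(f, j)])
         | none => (e, lst)) := by
  induction suffix with
  | nil =>
      intro i f e lst hi hdrop
      have hlen : (loglist.length : Int) ≤ i := by
        have := List.drop_eq_nil_iff.mp hdrop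
        omega
      rw [PySem.List.pyRange_one_eq_nil hlen]
      simp [aInner, bGo]
  | cons s rest ih =>
      intro i f e lst hi hdrop
      have hlt : i < (loglist.length : Int) := by
        have h := congrArg List.length hdrop
        simp [List.length_drop] at h
        omega
      have hget : PySem.List.pyGetD loglist i "" = s := by
        have h0 : loglist[i.toNat]? = some s := by
          have : (loglist.drop i.toNat)[0]? = some s := by rw [hdrop]; rfl
          simpa using this
        rw [PySem.List.pyGetD_eq_getElem _ _ hi hlt]
        obtain ⟨h, hv⟩ := List.getElem?_eq_some_iff.mp h0
        exact hv
      rw [PySem.List.pyRange_one_cons hlt]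
      by_cases hcr : PySem.Chars.isIn "consolidationResult".toList s.toList = true
      · simp only [show ("consolidationResult" : String).toList = ['c','o','n','s','o','l','i','d','a','t','i','o','n','R','e','s','u','l','t'] from rfl] at hcr
        simp [aInner, hget, hcr, bGo]
      · have hdrop' : loglist.drop (i + 1).toNat = rest := by
          have h1 : (i + 1).toNat = i.toNat + 1 := by omega
          rw [h1, ← List.drop_drop]  -- drop 1 (drop i.toNat loglist)
          rw [hdrop]
          rfl
        have hrec := ih (i + 1) f e lst (by omega) hdrop'
        simp only [aInner, hget]
        simp only [show ("consolidationResult" : String).toList = ['c','o','n','s','o','l','i','d','a','t','i','o','n','R','e','s','u','l','t'] from rfl] at hcr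
        rw [if_neg (by simpa using hcr), hrec]
        have hsnd : (bGo (s :: rest) i).2 = (bGo rest (i + 1)).2 := by
          simp [bGo, hcr]
        rw [hsnd]

-- the head-step shape of bGo
theorem bGo_cons_fst (s : String) (rest : List String) (i : Int) :
    (bGo (s :: rest) i).1 =
      if PySem.Str.isIn ">pGWRecord(79)" s then
        match (bGo (s :: rest) i).2 with
        | some j => (i, j) :: (bGo rest (i + 1)).1
        | none => (bGo rest (i + 1)).1
      else (bGo rest (i + 1)).1 := by
  simp [bGo]

-- the outer loop, over the enumerated suffix starting at index i
theorem outer_eq (loglist : List String) (suffix : List String) :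
    ∀ (i : Int) (f e : Int) (lst : List (Int × Int)), 0 ≤ i →
      loglist.drop i.toNat = suffix →
      ((PySem.List.enumerate suffix i).foldl
        (fun (st : Int × Int × List (Int × Int)) p =>
          if PySem.Str.isIn ">pGWRecord(79)" (PySem.List.pyGetD loglist p.1 "") then
            let front := p.1
            let (endv, lst) := aInner loglist front
              (PySem.List.pyRange front (loglist.length : Int) 1) st.2.1 st.2.2
            (front, endv, lst)
          else st)
        (f, e, lst)).2.2 = lst ++ (bGo suffix i).1 := by
  induction suffix with
  | nil =>
      intro i f e lst hi hdrop
      simp [PySem.List.enumerate_nil, bGo]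
  | cons s rest ih =>
      intro i f e lst hi hdrop
      have hlt : i < (loglist.length : Int) := by
        have h := congrArg List.length hdrop
        simp [List.length_drop] at h
        omega
      have hget : PySem.List.pyGetD loglist i "" = s := by
        have h0 : loglist[i.toNat]? = some s := by
          have : (loglist.drop i.toNat)[0]? = some s := by rw [hdrop]; rfl
          simpa using this
        rw [PySem.List.pyGetD_eq_getElem _ _ hi hlt]
        obtain ⟨h, hv⟩ := List.getElem?_eq_some_iff.mp h0
        exact hv
      have hdrop' : loglist.drop (i + 1).toNat = rest := by
        have h1 : (i + 1).toNat = i.toNat + 1 := by omega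
        rw [h1, ← List.drop_drop, hdrop]
        rfl
      rw [PySem.List.enumerate_cons, List.foldl_cons]
      by_cases hpg : PySem.Str.isIn ">pGWRecord(79)" (PySem.List.pyGetD loglist i "") = true
      · simp only [if_pos hpg]
        rw [aInner_eq loglist (s :: rest) i i e lst hi hdrop]
        rw [bGo_cons_fst]
        rw [if_pos (by rw [hget] at hpg; exact hpg)]
        cases hnx : (bGo (s :: rest) i).2 with
        | some j =>
            have h2 := ih (i + 1) i j (lst ++ [(i, j)]) (by omega) hdrop'
            simpa using h2
        | none =>
            simpa using ih (i + 1) i e lst (by omega) hdrop'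
      · simp only [if_neg hpg]
        rw [ih (i + 1) f e lst (by omega) hdrop']
        rw [bGo_cons_fst, if_neg (by rw [hget] at hpg; exact hpg)]

-- ===== VERDICT (by name: the statement is the Claim_ definition above) =====
theorem get_tup_spec : Claim_equal_get_tup := by
  intro loglist _
  unfold Spec_get_tup get_tup get_tup_alt
  have henum := PySem.List.enumerate_eq_map_pyRange loglist ""
  have hfold :
      (PySem.List.pyRange 0 (loglist.length : Int) 1).foldl
        (fun (st : Int × Int × List (Int × Int)) a =>
          if PySem.Str.isIn ">pGWRecord(79)" (PySem.List.pyGetD loglist a "") then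
            let front := a
            let (endv, lst) := aInner loglist front
              (PySem.List.pyRange front (loglist.length : Int) 1) st.2.1 st.2.2
            (front, endv, lst)
          else st)
        (-1, -1, []) =
      (PySem.List.enumerate loglist 0).foldl
        (fun (st : Int × Int × List (Int × Int)) p =>
          if PySem.Str.isIn ">pGWRecord(79)" (PySem.List.pyGetD loglist p.1 "") then
            let front := p.1
            let (endv, lst) := aInner loglist front
              (PySem.List.pyRange front (loglist.length : Int) 1) st.2.1 st.2.2
            (front, endv, lst)
          else st)
        (-1, -1, []) := by
    rw [henum, List.foldl_map]
    simp [PySem.List.len_eq]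
  rw [hfold]
  simpa using outer_eq loglist loglist 0 (-1) (-1) [] (by omega) (by simp)
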